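-- pv_equiv track=rewrite | github.com/Akhil2453/NRLScoringApp | app.py | golden_points_from_grid
-- ===== SOURCE A (Python) =====
-- def golden_points_from_grid(grid):
--     """
--     grid: list[list[bool]] top->bottom (row 0 is top, last row is bottom)
--     Rule per column:
--       - You can only stack contiguously from the bottom.
--       - Points for height h in a column: sum_{k=0}^{h-1} (10 + 5*k)
--     """
--     if not isinstance(grid, list):
--         return 0
--
--     rows = len(grid)
--     cols = len(grid[0]) if rows else 0
--     total = 0
--
--     for c in range(cols):
--         # contiguous height from bottom
--         h = 0
--         for r in range(rows - 1, -1, -1):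
--             try:
--                 cell = bool(grid[r][c])
--             except Exception:
--                 cell = False
--             if cell:
--                 h += 1
--             else:
--                 break
--         total += 10 * h + 5 * (h * (h - 1) // 2)
--
--     return total
-- ===== SOURCE B (Python) =====
-- def golden_points_from_grid(grid):
--     if not isinstance(grid, list):
--         return 0
--     rows = len(grid)
--     cols = len(grid[0]) if rows else 0
--     heights = [0] * cols
--     active = list(range(cols))
--     for r in range(rows - 1, -1, -1):
--         if not active:
--             break
--         still = []
--         for c in active:
--             try:
--                 cell = bool(grid[r][c])
--             except Exception:
--                 cell = False
--             if cell:
--                 heights[c] += 1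
--                 still.append(c)
--         active = still
--     return sum(10 * h + 5 * (h * (h - 1) // 2) for h in heights)
-- ===== Notes on version B (the rewrite author's own statement) =====
-- stated objective: alternative
-- what changed: Replaces A's column-major scan (inner bottom-up loop with break per column) by a single bottom-up row sweep maintaining a heights array and a shrinking list of still-active columns, summing the score formula over the heights at the end.
import Mathlib
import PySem

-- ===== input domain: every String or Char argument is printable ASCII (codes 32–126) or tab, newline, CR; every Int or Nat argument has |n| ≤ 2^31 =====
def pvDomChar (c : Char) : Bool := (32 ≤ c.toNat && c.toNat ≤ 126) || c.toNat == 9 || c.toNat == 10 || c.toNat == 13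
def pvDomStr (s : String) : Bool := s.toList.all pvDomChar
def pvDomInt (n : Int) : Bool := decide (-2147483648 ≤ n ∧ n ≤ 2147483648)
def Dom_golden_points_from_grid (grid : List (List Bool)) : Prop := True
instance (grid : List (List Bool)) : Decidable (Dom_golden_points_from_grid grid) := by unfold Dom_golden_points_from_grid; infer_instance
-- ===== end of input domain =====

-- B replaces A's column-major scan by a single bottom-up row sweep over a heights array
-- and a shrinking active-column list (objective: alternative; same score values, same totals).

-- ===== PORT A =====
-- try: cell = bool(grid[r][c]) except Exception: cell = False
def pvCellA (grid : List (List Bool)) (r c : Int) : Bool :=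
  match PySem.List.pyGet? grid r with
  | some row => (PySem.List.pyGet? row c).getD false
  | none => false

-- inner loop 'for r in …: … if cell: h += 1 else: break' as structural recursion on the row indices
def pvColA (grid : List (List Bool)) (c : Int) : List Int → Int
  | [] => 0
  | r :: rs => if pvCellA grid r c then 1 + pvColA grid c rs else 0

def golden_points_from_grid (grid : List (List Bool)) : Int :=
  let rows : Int := grid.length
  let cols : Int := if rows ≠ 0 then (((PySem.List.pyGet? grid 0).getD []).length : Int) else 0
  (PySem.List.pyRange 0 cols 1).foldl
    (fun total c =>
      let h := pvColA grid c (PySem.List.pyRange (rows - 1) (-1) (-1))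
      total + 10 * h + 5 * (PySem.Int.floordiv (h * (h - 1)) 2)) 0

-- ===== PORT B =====
def pvCellB (grid : List (List Bool)) (r c : Int) : Bool :=
  match PySem.List.pyGet? grid r with
  | some row => (PySem.List.pyGet? row c).getD false
  | none => false

-- heights[c] += 1   (c is always a nonnegative in-range column index)
def pvBump (hs : List Int) (c : Int) : List Int :=
  hs.set c.toNat ((hs.getD c.toNat 0) + 1)

-- outer loop over rows, bottom-up, with the 'if not active: break' guard
def pvSweep (grid : List (List Bool)) : List Int → List Int → List Int → List Int
  | [], hs, _ => hs
  | r :: rs, hs, active =>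
    if active = [] then hs
    else
      let p := active.foldl
        (fun (st : List Int × List Int) c =>
          if pvCellB grid r c then (pvBump st.1 c, st.2 ++ [c]) else st)
        (hs, [])
      pvSweep grid rs p.1 p.2

def golden_points_from_grid_alt (grid : List (List Bool)) : Int :=
  let rows : Int := grid.length
  let cols : Int := if rows ≠ 0 then (((PySem.List.pyGet? grid 0).getD []).length : Int) else 0
  let heights := pvSweep grid (PySem.List.pyRange (rows - 1) (-1) (-1))
      (List.replicate cols.toNat 0) (PySem.List.pyRange 0 cols 1)
  (heights.map (fun h => 10 * h + 5 * (PySem.Int.floordiv (h * (h - 1)) 2))).sum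

-- ===== PRECONDITION & SPEC =====
def Spec_golden_points_from_grid (grid : List (List Bool)) (out : Int) : Prop := out = golden_points_from_grid_alt grid
instance (grid : List (List Bool)) (out : Int) : Decidable (Spec_golden_points_from_grid grid out) := by unfold Spec_golden_points_from_grid; infer_instance

-- ===== CLAIM (what is proved, stated in full; the proofs are below) =====
def Claim_equal_golden_points_from_grid : Prop := ∀ (grid : List (List Bool)), Dom_golden_points_from_grid grid → Spec_golden_points_from_grid grid (golden_points_from_grid grid)

-- ===== LEMMAS AND PROOFS =====

theorem pvCellB_eq_pvCellA (grid : List (List Bool)) (r c : Int) :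
    pvCellB grid r c = pvCellA grid r c := rfl

theorem pvBump_length (hs : List Int) (c : Int) : (pvBump hs c).length = hs.length := by
  simp [pvBump]

-- the inner 'for c in active' fold splits into a bump-fold and the filtered survivor list
theorem pvInner_fold (grid : List (List Bool)) (r : Int) :
    ∀ (cs : List Int) (hs : List Int) (a0 : List Int),
      cs.foldl (fun (st : List Int × List Int) c =>
          if pvCellB grid r c then (pvBump st.1 c, st.2 ++ [c]) else st) (hs, a0)
        = ((cs.filter (fun c => pvCellB grid r c)).foldl pvBump hs,
           a0 ++ cs.filter (fun c => pvCellB grid r c)) := by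
  intro cs
  induction cs with
  | nil => intro hs a0; simp
  | cons c cs ih =>
    intro hs a0
    by_cases h : pvCellB grid r c = true
    · simp [h, List.foldl_cons, ih]
    · simp only [Bool.not_eq_true] at h
      simp [h, List.foldl_cons, ih]

-- bump-fold over a nodup in-range index list increments exactly the listed entries
theorem pvBumpFold_spec :
    ∀ (l : List Int) (hs : List Int), l.Nodup →
      (∀ c ∈ l, 0 ≤ c ∧ c.toNat < hs.length) →
      (l.foldl pvBump hs).length = hs.length ∧
      ∀ (i : Nat) (hi : i < hs.length),
        (l.foldl pvBump hs).getD i 0 = hs.getD i 0 + (if (i : Int) ∈ l then 1 else 0) := by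
  intro l
  induction l with
  | nil => intro hs _ _; simp
  | cons c l ih =>
    intro hs hnd hrng
    have hc := hrng c (by simp)
    have hnd' : l.Nodup := hnd.of_cons
    have hrng' : ∀ x ∈ l, 0 ≤ x ∧ x.toNat < (pvBump hs c).length := by
      intro x hx; rw [pvBump_length]; exact hrng x (by simp [hx])
    obtain ⟨hlen, hget⟩ := ih (pvBump hs c) hnd' hrng'
    rw [pvBump_length] at hlen hget
    refine ⟨by simpa [List.foldl_cons] using hlen, ?_⟩
    intro i hi
    rw [List.foldl_cons, hget i hi]
    have hnotmem : c ∉ l := (List.nodup_cons.mp hnd).1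
    by_cases hic : (i : Int) = c
    · have hcn : c.toNat = i := by omega
      have : (pvBump hs c).getD i 0 = hs.getD i 0 + 1 := by
        simp [pvBump, hcn, List.getD_eq_getElem?_getD, hi]
      rw [this]
      have h1 : (i : Int) ∈ c :: l := by simp [hic]
      have h2 : (i : Int) ∉ l := by rw [hic]; exact hnotmem
      simp [h1, h2]
    · have hcn : c.toNat ≠ i := by omega
      have : (pvBump hs c).getD i 0 = hs.getD i 0 := by
        simp [pvBump, List.getD_eq_getElem?_getD, List.getElem?_set_ne hcn]
      rw [this]
      by_cases him : (i : Int) ∈ l <;> simp [him, hic]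

-- the row sweep computes, per still-active column, A's bottom-up contiguous height
theorem pvSweep_spec (grid : List (List Bool)) :
    ∀ (rs : List Int) (active hs : List Int), active.Nodup →
      (∀ c ∈ active, 0 ≤ c ∧ c.toNat < hs.length) →
      (pvSweep grid rs hs active).length = hs.length ∧
      ∀ (i : Nat) (hi : i < hs.length),
        (pvSweep grid rs hs active).getD i 0
          = hs.getD i 0 + (if (i : Int) ∈ active then pvColA grid i rs else 0) := by
  intro rs
  induction rs with
  | nil => intro active hs _ _; simp [pvSweep, pvColA]
  | cons r rs ih =>
    intro active hs hnd hrng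
    by_cases hA : active = []
    · subst hA; simp [pvSweep]
    · rw [pvSweep, if_neg hA]
      rw [pvInner_fold grid r active hs []]
      simp only [List.nil_append]
      set keep := fun c => pvCellB grid r c with hkeep
      set l := active.filter keep with hl
      obtain ⟨hblen, hbget⟩ := pvBumpFold_spec l hs (hnd.filter keep)
        (fun c hc => hrng c (List.mem_of_mem_filter hc))
      have hrng2 : ∀ c ∈ l, 0 ≤ c ∧ c.toNat < (l.foldl pvBump hs).length := by
        intro c hc; rw [hblen]; exact hrng c (List.mem_of_mem_filter hc)
      obtain ⟨hslen, hsget⟩ := ih l (l.foldl pvBump hs) (hnd.filter keep) hrng2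
      rw [hblen] at hslen hsget
      refine ⟨hslen, ?_⟩
      intro i hi
      rw [hsget i hi, hbget i hi]
      by_cases him : (i : Int) ∈ active
      · by_cases hki : keep (i : Int) = true
        · have hmf : (i : Int) ∈ l := by
            rw [hl]; exact List.mem_filter.mpr ⟨him, hki⟩
          have hcell : pvCellA grid r i = true := by
            rw [← pvCellB_eq_pvCellA]; exact hki
          simp [hmf, him, pvColA, hcell]; ring
        · have hmf : (i : Int) ∉ l := by
            rw [hl]; intro hmem
            exact hki (List.mem_filter.mp hmem).2
          have hcell : pvCellA grid r i = false := by
            rw [← pvCellB_eq_pvCellA]; simpa using hki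
          simp [hmf, him, pvColA, hcell]
      · have hmf : (i : Int) ∉ l := by
          rw [hl]; intro hmem
          exact him (List.mem_of_mem_filter hmem)
        simp [hmf, him]

theorem pvHeights_eq (grid : List (List Bool)) (cols : Int) (hcols : 0 ≤ cols) (rs : List Int) :
    pvSweep grid rs (List.replicate cols.toNat 0) (PySem.List.pyRange 0 cols 1)
      = (List.range cols.toNat).map (fun i : Nat => pvColA grid (i : Int) rs) := by
  obtain ⟨hlen, hget⟩ := pvSweep_spec grid rs (PySem.List.pyRange 0 cols 1)
    (List.replicate cols.toNat 0)
    (PySem.List.nodup_pyRange_one 0 cols)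
    (by
      intro c hc
      have := (PySem.List.mem_pyRange_one (x := c) (a := 0) (b := cols)).mp hc
      constructor
      · omega
      · rw [List.length_replicate]; omega)
  rw [List.length_replicate] at hlen hget
  apply List.ext_getElem
  · simp [hlen]
  · intro i h1 h2
    have hi : i < cols.toNat := by simpa using h2
    have := hget i hi
    rw [List.getD_eq_getElem?_getD, List.getElem?_eq_getElem h1] at this
    have hmem : (i : Int) ∈ PySem.List.pyRange 0 cols 1 := by
      rw [PySem.List.mem_pyRange_one]; omega
    simp only [hmem, if_true] at this
    simp only [List.getD_eq_getElem?_getD, List.getElem?_replicate, hi, if_pos] at this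
    rw [List.getElem_map, List.getElem_range]
    simpa using this

theorem pv_total_eq (grid : List (List Bool)) (cols : Int) (hc0 : 0 ≤ cols) (rl : List Int) :
    (PySem.List.pyRange 0 cols 1).foldl
      (fun total c =>
        let h := pvColA grid c rl
        total + 10 * h + 5 * (PySem.Int.floordiv (h * (h - 1)) 2)) 0
    = ((pvSweep grid rl (List.replicate cols.toNat 0) (PySem.List.pyRange 0 cols 1)).map
        (fun h => 10 * h + 5 * (PySem.Int.floordiv (h * (h - 1)) 2))).sum := by
  rw [pvHeights_eq grid cols hc0 rl, List.map_map]
  have hfold :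
      (PySem.List.pyRange 0 cols 1).foldl
        (fun total c =>
          let h := pvColA grid c rl
          total + 10 * h + 5 * (PySem.Int.floordiv (h * (h - 1)) 2)) 0
      = (PySem.List.pyRange 0 cols 1).foldl
          (fun total c => total +
            (10 * pvColA grid c rl +
              5 * (PySem.Int.floordiv (pvColA grid c rl * (pvColA grid c rl - 1)) 2))) 0 := by
    apply PySem.List.foldl_congr_mem
    intro total c _
    simp only []
    ring
  rw [hfold, PySem.List.foldl_add, PySem.List.pyRange_one]
  simp [Function.comp_def]

theorem golden_points_from_grid_eq (grid : List (List Bool)) :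
    golden_points_from_grid grid = golden_points_from_grid_alt grid := by
  unfold golden_points_from_grid golden_points_from_grid_alt
  dsimp only
  have hc0 : (0:Int) ≤ (if (grid.length : Int) ≠ 0
      then (((PySem.List.pyGet? grid 0).getD []).length : Int) else 0) := by
    split <;> positivity
  exact pv_total_eq grid _ hc0 _

-- ===== VERDICT (by name: the statement is the Claim_ definition above) =====
theorem golden_points_from_grid_spec : Claim_equal_golden_points_from_grid := by
  intro grid _
  unfold Spec_golden_points_from_grid
  exact golden_points_from_grid_eq grid
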